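-- pv_equiv track=rewrite | github.com/zingzincoachtay/rm_by_exif | diffexif.py | setmaxcolsizes
-- ===== SOURCE A (Python) =====
-- def setmaxcolsizes(D) :
--   Ncol,N = [],[]
--   for d in range(0,len(D)) :
--     p = D[d]
--     for k in range(0,len(p)) :
--       try : Ncol[k].append(  p[k]  )
--       except : Ncol.append( [p[k]] )
--   for n in range(0,len(Ncol)) :
--     N.append( max( Ncol[n] ) )
--   return N
-- ===== SOURCE B (Python) =====
-- def setmaxcolsizes(D):
--     # Single pass keeping running per-column maxima; no column table is built.
--     N = []
--     for p in D:
--         N = [max(n, x) for n, x in zip(N, p)] + N[len(p):] + p[len(N):]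
--     return N
-- ===== Notes on version B (the rewrite author's own statement) =====
-- stated objective: simpler
-- what changed: B keeps a single list of running per-column maxima updated row by row (zip + leftover tails), instead of A's two-phase build of a full column table via indexed try/except appends followed by a separate max-reduction loop.
import Mathlib
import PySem

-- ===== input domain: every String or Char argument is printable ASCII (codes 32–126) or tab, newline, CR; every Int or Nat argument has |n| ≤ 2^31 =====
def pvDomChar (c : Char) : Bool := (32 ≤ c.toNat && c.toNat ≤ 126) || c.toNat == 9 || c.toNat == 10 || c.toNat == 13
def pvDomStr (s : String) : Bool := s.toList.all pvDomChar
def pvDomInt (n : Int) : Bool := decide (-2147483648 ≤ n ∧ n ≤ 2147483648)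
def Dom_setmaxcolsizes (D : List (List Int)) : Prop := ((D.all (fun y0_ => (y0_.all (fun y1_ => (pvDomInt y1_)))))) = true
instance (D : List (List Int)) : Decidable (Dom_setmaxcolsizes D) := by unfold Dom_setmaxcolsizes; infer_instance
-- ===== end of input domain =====

-- B fuses A's column-table build and max-reduction into one pass of running per-column maxima (objective: simpler).

-- ===== PORT A =====
-- inner-loop body: `try: Ncol[k].append(p[k])  except: Ncol.append([p[k]])`
-- (p[k] is ported with pyGetD: k comes from range(len(p)), so it is always in range)
def pvStepA (p : List Int) (Nc : List (List Int)) (k : Int) : List (List Int) :=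
  match PySem.List.pyGet? Nc k with
  | some col => Nc.set k.toNat (col ++ [PySem.List.pyGetD p k 0])
  | none     => Nc ++ [[PySem.List.pyGetD p k 0]]

-- `max(Ncol[n])` never sees an empty list (columns are built nonempty), so the
-- .getD 0 default of max? is unreachable.
def setmaxcolsizes (D : List (List Int)) : List Int :=
  let Ncol := (PySem.List.pyRange 0 (D.length : Int) 1).foldl
    (fun Nc d =>
      (PySem.List.pyRange 0 (((PySem.List.pyGetD D d []).length : Int)) 1).foldl
        (pvStepA (PySem.List.pyGetD D d [])) Nc) []
  (PySem.List.pyRange 0 (Ncol.length : Int) 1).foldl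
    (fun N n => N ++ [(PySem.List.max? (PySem.List.pyGetD Ncol n []) (fun y => y)).getD 0]) []

-- ===== PORT B =====
-- `N = [max(n, x) for n, x in zip(N, p)] + N[len(p):] + p[len(N):]`
def setmaxcolsizes_alt (D : List (List Int)) : List Int :=
  D.foldl (fun N p =>
    (List.zipWith (fun n x => max n x) N p)
      ++ PySem.List.slice N (some (p.length : Int)) none
      ++ PySem.List.slice p (some (N.length : Int)) none) []

-- ===== PRECONDITION & SPEC =====
def Spec_setmaxcolsizes (D : List (List Int)) (out : List Int) : Prop := out = setmaxcolsizes_alt D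
instance (D : List (List Int)) (out : List Int) : Decidable (Spec_setmaxcolsizes D out) := by unfold Spec_setmaxcolsizes; infer_instance

-- ===== CLAIM (what is proved, stated in full; the proofs are below) =====
def Claim_equal_setmaxcolsizes : Prop := ∀ (D : List (List Int)), Dom_setmaxcolsizes D → Spec_setmaxcolsizes D (setmaxcolsizes D)

-- ===== LEMMAS AND PROOFS =====

-- max of a nonempty column, as A computes it
def pvColmax (c : List Int) : Int := (PySem.List.max? c (fun y => y)).getD 0

-- what A's inner loop does to the column table, as structural recursion
def pvAddRow : List (List Int) → List Int → List (List Int)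
  | Nc, [] => Nc
  | [], x :: xs => [x] :: pvAddRow [] xs
  | c :: cs, x :: xs => (c ++ [x]) :: pvAddRow cs xs

-- B's row update, as structural recursion
def pvMergeRec : List Int → List Int → List Int
  | [], p => p
  | N, [] => N
  | n :: ns, x :: xs => max n x :: pvMergeRec ns xs

lemma pvMergeRec_nil (N : List Int) : pvMergeRec N [] = N := by
  cases N <;> rfl

lemma merge_eq_rec (N p : List Int) :
    (List.zipWith (fun n x => max n x) N p)
      ++ PySem.List.slice N (some (p.length : Int)) none
      ++ PySem.List.slice p (some (N.length : Int)) none = pvMergeRec N p := by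
  induction N generalizing p with
  | nil => simp [pvMergeRec, PySem.List.slice_from_natCast]
  | cons n ns ih =>
    cases p with
    | nil => simp [pvMergeRec_nil, PySem.List.slice]
    | cons x xs =>
      have := ih xs
      simp only [PySem.List.slice_from_natCast] at this ⊢
      simpa [pvMergeRec, List.zipWith_cons_cons] using this

lemma colmax_singleton (x : Int) : pvColmax [x] = x := by
  simp [pvColmax, PySem.List.max?_id_cons]

lemma colmax_append (c : List Int) (x : Int) (h : c ≠ []) :
    pvColmax (c ++ [x]) = max (pvColmax c) x := by
  obtain ⟨a, t, rfl⟩ := List.exists_cons_of_ne_nil h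
  simp [pvColmax, PySem.List.max?_id_cons, List.foldl_append]

lemma addRow_ne (p : List Int) : ∀ (Ncol : List (List Int)),
    (∀ c ∈ Ncol, c ≠ []) → ∀ c ∈ pvAddRow Ncol p, c ≠ [] := by
  induction p with
  | nil => intro Ncol h; simpa [pvAddRow] using h
  | cons x xs ih =>
    intro Ncol h c hc
    cases Ncol with
    | nil =>
      simp only [pvAddRow, List.mem_cons] at hc
      rcases hc with rfl | hc
      · simp
      · exact ih [] (by simp) c hc
    | cons a t =>
      simp only [pvAddRow, List.mem_cons] at hc
      rcases hc with rfl | hc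
      · simp
      · exact ih t (fun d hd => h d (List.mem_cons_of_mem _ hd)) c hc

lemma mergeMap (p : List Int) : ∀ (Ncol : List (List Int)), (∀ c ∈ Ncol, c ≠ []) →
    pvMergeRec (Ncol.map pvColmax) p = (pvAddRow Ncol p).map pvColmax := by
  induction p with
  | nil => intro Ncol _; simp [pvMergeRec_nil, pvAddRow]
  | cons x xs ih =>
    intro Ncol h
    cases Ncol with
    | nil =>
      simp only [List.map_nil, pvMergeRec, pvAddRow, List.map_cons, colmax_singleton]
      exact congrArg (x :: ·) (by simpa using ih [] (by simp))
    | cons c cs =>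
      simp only [List.map_cons, pvMergeRec, pvAddRow,
        colmax_append c x (h c (List.mem_cons_self))]
      exact congrArg _ (ih cs (fun d hd => h d (List.mem_cons_of_mem _ hd)))

-- A's inner loop over k in range(len(p)) builds columns exactly as pvAddRow does
lemma innerA (p : List Int) : ∀ (xs : List Int) (pre suf : List (List Int)),
    p.drop pre.length = xs → p.length = pre.length + xs.length →
    (PySem.List.pyRange (pre.length : Int) (p.length : Int) 1).foldl (pvStepA p) (pre ++ suf)
      = pre ++ pvAddRow suf xs := by
  intro xs
  induction xs with
  | nil =>
    intro pre suf _ hlen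
    have hlen' : p.length = pre.length := by simpa using hlen
    rw [PySem.List.pyRange_one_eq_nil (by omega)]
    simp [pvAddRow]
  | cons x xs ih =>
    intro pre suf hdrop hlen
    have hlen' : p.length = pre.length + xs.length + 1 := by simp at hlen; omega
    have hlt : (pre.length : Int) < (p.length : Int) := by omega
    rw [PySem.List.pyRange_one_cons hlt]
    have hpk : PySem.List.pyGetD p (pre.length : Int) 0 = x := by
      have h0 : p[pre.length]? = some x := by
        have : (p.drop pre.length)[0]? = some x := by rw [hdrop]; rfl
        simpa using this
      simp [PySem.List.pyGetD_natCast, List.getD, h0]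
    have hdrop' : p.drop (pre.length + 1) = xs := by
      have : (p.drop pre.length).drop 1 = xs := by rw [hdrop]; rfl
      simpa [List.drop_drop, Nat.add_comm] using this
    cases suf with
    | nil =>
      have hstep : pvStepA p (pre ++ []) (pre.length : Int) = (pre ++ [[x]]) ++ [] := by
        simp [pvStepA, hpk]
      rw [List.foldl_cons, hstep]
      have := ih (pre ++ [[x]]) [] (by simpa using hdrop') (by simp; omega)
      simp only [List.length_append, List.length_cons, List.length_nil] at this
      have hc : ((pre.length + 1 : Nat) : Int) = (pre.length : Int) + 1 := by push_cast; ring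
      rw [hc] at this
      rw [this]
      simp [pvAddRow]
    | cons c cs =>
      have hget : PySem.List.pyGet? (pre ++ c :: cs) (pre.length : Int) = some c :=
        PySem.List.pyGet?_append_length pre cs c
      have hstep : pvStepA p (pre ++ c :: cs) (pre.length : Int)
          = (pre ++ [c ++ [x]]) ++ cs := by
        simp only [pvStepA, hget, hpk, Int.toNat_natCast]
        rw [List.set_append_right _ _ (Nat.le_refl _)]
        simp
      rw [List.foldl_cons, hstep]
      have := ih (pre ++ [c ++ [x]]) cs (by simpa using hdrop') (by simp; omega)
      simp only [List.length_append, List.length_cons, List.length_nil] at this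
      have hc : ((pre.length + 1 : Nat) : Int) = (pre.length : Int) + 1 := by push_cast; ring
      rw [hc] at this
      rw [this]
      simp [pvAddRow]

lemma rowA (p : List Int) (Ncol : List (List Int)) :
    (PySem.List.pyRange 0 (p.length : Int) 1).foldl (pvStepA p) Ncol = pvAddRow Ncol p := by
  have := innerA p p [] Ncol (by simp) (by simp)
  simpa using this

lemma foldl_append_map {α : Type} (g : α → Int) :
    ∀ (l : List α) (acc : List Int),
      l.foldl (fun N c => N ++ [g c]) acc = acc ++ l.map g := by
  intro l
  induction l with
  | nil => simp
  | cons c cs ih => intro acc; simp [ih]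

lemma bigInv (D : List (List Int)) : ∀ (Ncol : List (List Int)), (∀ c ∈ Ncol, c ≠ []) →
    D.foldl pvMergeRec (Ncol.map pvColmax) = (D.foldl pvAddRow Ncol).map pvColmax := by
  induction D with
  | nil => intro Ncol _; rfl
  | cons p ps ih =>
    intro Ncol h
    simp only [List.foldl_cons]
    rw [mergeMap p Ncol h]
    exact ih (pvAddRow Ncol p) (addRow_ne p Ncol h)

lemma main_eq (D : List (List Int)) : setmaxcolsizes D = setmaxcolsizes_alt D := by
  unfold setmaxcolsizes setmaxcolsizes_alt
  rw [PySem.List.foldl_pyRange_zero_pyGetD' D ([] : List Int)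
    (fun Nc p => (PySem.List.pyRange 0 (p.length : Int) 1).foldl (pvStepA p) Nc) []]
  have hrows : (fun Nc p => (PySem.List.pyRange 0 ((p : List Int).length : Int) 1).foldl (pvStepA p) Nc)
      = pvAddRow := by
    funext Nc p; exact rowA p Nc
  rw [hrows]
  rw [PySem.List.foldl_pyRange_zero_pyGetD' (D.foldl pvAddRow []) ([] : List Int)
    (fun N c => N ++ [(PySem.List.max? c (fun y => y)).getD 0]) []]
  rw [foldl_append_map (fun c => (PySem.List.max? c (fun y => y)).getD 0)]
  have hB : (fun N p =>
      (List.zipWith (fun n x => max n x) N p)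
        ++ PySem.List.slice N (some ((p : List Int).length : Int)) none
        ++ PySem.List.slice p (some (N.length : Int)) none) = pvMergeRec := by
    funext N p; exact merge_eq_rec N p
  rw [hB]
  have := bigInv D [] (by simp)
  simp only [List.map_nil] at this
  rw [this]
  rfl

-- ===== VERDICT (by name: the statement is the Claim_ definition above) =====
theorem setmaxcolsizes_spec : Claim_equal_setmaxcolsizes := by
  intro D _
  unfold Spec_setmaxcolsizes
  exact main_eq D
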